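-- pv_equiv track=rewrite | github.com/lozovoyd/RusNAS | rusnas-guard/daemon/detector.py | _dedup_watch_paths
-- ===== SOURCE A (Python) =====
-- def _dedup_watch_paths(paths: list) -> list:
--     """Remove paths that are subdirectories of other monitored paths.
--     InotifyTrees watches recursively — having both /mnt/data and
--     /mnt/data/documents would cause every event in /mnt/data/documents
--     to fire twice (once per watch root)."""
--     sorted_paths = sorted(set(paths))  # shortest (parent) paths first
--     result = []
--     for p in sorted_paths:
--         p_norm = p.rstrip('/')
--         if not any(p_norm.startswith(r.rstrip('/') + '/') for r in result):
--             result.append(p)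
--     return result
-- ===== SOURCE B (Python) =====
-- def _dedup_watch_paths(paths: list) -> list:
--     """Remove paths that are subdirectories of other monitored paths.
--
--     Single pass over the sorted distinct paths keeping a hash set of the
--     normalized roots already accepted; a path is a subdirectory of an
--     accepted root exactly when one of its '/'-boundary prefixes is in the
--     set, so each path is checked in O(depth) ancestor lookups instead of
--     scanning the whole result list."""
--     result = []
--     roots = set()
--     for p in sorted(set(paths)):
--         p_norm = p.rstrip('/')
--         if not any(p_norm[:i] in roots for i, ch in enumerate(p_norm) if ch == '/'):
--             result.append(p)
--             roots.add(p_norm)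
--     return result
-- ===== Notes on version B (the rewrite author's own statement) =====
-- stated objective: faster
-- what changed: Replaces the inner scan of the whole result list (each testing startswith against a re-normalized root) by a hash set of normalized accepted roots queried at each '/'-boundary prefix of the candidate path.
import Mathlib
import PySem

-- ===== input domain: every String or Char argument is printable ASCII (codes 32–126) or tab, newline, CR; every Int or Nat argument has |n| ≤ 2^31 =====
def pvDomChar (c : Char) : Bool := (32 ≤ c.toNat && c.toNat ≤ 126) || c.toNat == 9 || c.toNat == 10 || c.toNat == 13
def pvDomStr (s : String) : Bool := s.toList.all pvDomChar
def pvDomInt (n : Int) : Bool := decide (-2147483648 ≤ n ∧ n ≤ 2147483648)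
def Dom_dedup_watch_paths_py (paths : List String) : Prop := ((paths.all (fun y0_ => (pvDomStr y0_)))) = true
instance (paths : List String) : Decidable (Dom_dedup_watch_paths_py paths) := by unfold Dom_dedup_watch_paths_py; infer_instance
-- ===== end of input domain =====

-- B replaces A's inner scan of the whole result list by a hash set of normalized roots
-- queried at each '/'-boundary prefix of the path (objective: faster).

-- shared helper: Python's  s.rstrip('/')  on the char list (exact: drops trailing '/' chars)
def rstripSlashL (cs : List Char) : List Char := (cs.reverse.dropWhile (· == '/')).reverse

-- ===== PORT A =====
def dedup_watch_paths_py (paths : List String) : List String :=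
  (PySem.List.sorted (PySem.Set.ofList paths) (fun x => x) false).foldl
    (fun result p =>
      let p_norm := rstripSlashL p.toList
      if result.any (fun r => PySem.Chars.startswith p_norm (rstripSlashL r.toList ++ ['/'])) then
        result
      else
        result ++ [p]) []

-- ===== PORT B =====
def dedup_watch_paths_py_alt (paths : List String) : List String :=
  ((PySem.List.sorted (PySem.Set.ofList paths) (fun x => x) false).foldl
    (fun (st : List String × PySem.Set (List Char)) p =>
      let p_norm := rstripSlashL p.toList
      if (PySem.List.enumerate p_norm 0).any
           (fun ic => ic.2 == '/' && PySem.Set.contains st.2 (PySem.List.slice p_norm none (some ic.1))) then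
        st
      else
        (st.1 ++ [p], PySem.Set.add st.2 p_norm)) ([], PySem.Set.empty)).1

-- ===== PRECONDITION & SPEC =====
def Spec_dedup_watch_paths_py (paths : List String) (out : List String) : Prop := out = dedup_watch_paths_py_alt paths
instance (paths : List String) (out : List String) : Decidable (Spec_dedup_watch_paths_py paths out) := by unfold Spec_dedup_watch_paths_py; infer_instance

-- ===== CLAIM (what is proved, stated in full; the proofs are below) =====
def Claim_equal_dedup_watch_paths_py : Prop := ∀ (paths : List String), Dom_dedup_watch_paths_py paths → Spec_dedup_watch_paths_py paths (dedup_watch_paths_py paths)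

-- ===== LEMMAS AND PROOFS =====

-- q ++ [c] is a prefix of s  ↔  s has q at a position followed by c
lemma prefix_append_singleton_iff (q : List Char) (c : Char) (s : List Char) :
    q ++ [c] <+: s ↔ q.length < s.length ∧ s.take q.length = q ∧ s[q.length]? = some c := by
  constructor
  · rintro ⟨t, rfl⟩
    refine ⟨by simp, ?_, ?_⟩
    · rw [List.append_assoc, List.take_left]
    · rw [List.append_assoc, List.getElem?_append_right (le_refl _)]
      simp
  · rintro ⟨h1, h2, h3⟩
    refine ⟨s.drop (q.length + 1), ?_⟩
    have hc : s[q.length] = c := by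
      have := List.getElem?_eq_getElem h1
      rw [h3] at this; exact (Option.some_inj.mp this.symm)
    conv_rhs => rw [← List.take_append_drop q.length s, List.drop_eq_getElem_cons h1]
    rw [h2, hc]; simp

-- B's ancestor-prefix test over the roots set equals A's scan of the result list
lemma cond_eq (result : List String) (roots : PySem.Set (List Char))
    (hinv : ∀ q, q ∈ roots ↔ ∃ r ∈ result, rstripSlashL r.toList = q) (s : List Char) :
    ((PySem.List.enumerate s 0).any
        (fun ic => ic.2 == '/' && PySem.Set.contains roots (PySem.List.slice s none (some ic.1))))
      = (result.any (fun r => PySem.Chars.startswith s (rstripSlashL r.toList ++ ['/']))) := by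
  rw [Bool.eq_iff_iff]
  simp only [List.any_eq_true, Bool.and_eq_true, beq_iff_eq, PySem.Chars.startswith_iff,
    PySem.List.mem_enumerate_iff]
  constructor
  · rintro ⟨ic, ⟨k, hk, rfl⟩, hsl, hmem⟩
    rw [PySem.Set.contains_iff] at hmem
    simp only [zero_add, PySem.List.slice_to_natCast] at hmem
    obtain ⟨r, hr, hq⟩ := (hinv _).mp hmem
    refine ⟨r, hr, ?_⟩
    rw [prefix_append_singleton_iff]
    have hlen : (rstripSlashL r.toList).length = k := by rw [hq]; simp [List.length_take]; omega
    rw [hlen, ← hq]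
    have hsl' : s[k] = '/' := hsl
    exact ⟨hk, rfl, by rw [List.getElem?_eq_getElem hk, hsl']⟩
  · rintro ⟨r, hr, hpre⟩
    rw [prefix_append_singleton_iff] at hpre
    obtain ⟨h1, h2, h3⟩ := hpre
    refine ⟨((rstripSlashL r.toList).length, '/'), ⟨(rstripSlashL r.toList).length, h1, by
      simp [List.getElem?_eq_getElem h1] at h3; simp [h3]⟩, rfl, ?_⟩
    rw [PySem.Set.contains_iff]
    simp only [PySem.List.slice_to_natCast]
    exact (hinv _).mpr ⟨r, hr, h2.symm⟩

-- the two folds stay in lockstep: B's state is (A's result, set of its normalized roots)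
lemma loop_eq (l : List String) (result : List String) (roots : PySem.Set (List Char))
    (hinv : ∀ q, q ∈ roots ↔ ∃ r ∈ result, rstripSlashL r.toList = q) :
    (l.foldl
      (fun (st : List String × PySem.Set (List Char)) p =>
        let p_norm := rstripSlashL p.toList
        if (PySem.List.enumerate p_norm 0).any
             (fun ic => ic.2 == '/' && PySem.Set.contains st.2 (PySem.List.slice p_norm none (some ic.1))) then
          st
        else
          (st.1 ++ [p], PySem.Set.add st.2 p_norm)) (result, roots)).1
    = l.foldl
      (fun result p =>
        let p_norm := rstripSlashL p.toList
        if result.any (fun r => PySem.Chars.startswith p_norm (rstripSlashL r.toList ++ ['/'])) then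
          result
        else
          result ++ [p]) result := by
  induction l generalizing result roots with
  | nil => rfl
  | cons p tl ih =>
    simp only [List.foldl_cons]
    rw [cond_eq result roots hinv (rstripSlashL p.toList)]
    by_cases h : (result.any (fun r => PySem.Chars.startswith (rstripSlashL p.toList)
        (rstripSlashL r.toList ++ ['/']))) = true
    · simp only [h, if_true]
      exact ih result roots hinv
    · simp only [h]
      apply ih
      intro q
      rw [PySem.Set.mem_add]
      simp only [List.mem_append, List.mem_singleton]
      constructor
      · rintro (hq | rfl)
        · obtain ⟨r, hr, hrq⟩ := (hinv q).mp hq; exact ⟨r, Or.inl hr, hrq⟩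
        · exact ⟨p, Or.inr rfl, rfl⟩
      · rintro ⟨r, (hr | rfl), hrq⟩
        · exact Or.inl ((hinv q).mpr ⟨r, hr, hrq⟩)
        · exact Or.inr hrq.symm

-- ===== VERDICT (by name: the statement is the Claim_ definition above) =====
theorem dedup_watch_paths_py_spec : Claim_equal_dedup_watch_paths_py := by
  intro paths _
  unfold Spec_dedup_watch_paths_py dedup_watch_paths_py dedup_watch_paths_py_alt
  exact (loop_eq _ [] PySem.Set.empty (by simp [PySem.Set.empty])).symm
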